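-- pv_equiv track=rewrite | github.com/dpsnet/Fixed-4D-Topology | extended_research/I_network_geometry/data/analyze_large_network.py | bfs_ball
-- ===== SOURCE A (Python) =====
-- from typing import Dict, Set, List, Tuple, Optional
--
-- def bfs_ball(graph: Dict[int, Set[int]], center: int, radius: int) -> Set[int]:
--     """BFS to get ball of given radius."""
--     ball = {center}
--     frontier = {center}
--
--     for _ in range(radius):
--         new_frontier = set()
--         for node in frontier:
--             new_frontier.update(graph.get(node, set()))
--         new_frontier -= ball
--         ball.update(new_frontier)
--         frontier = new_frontier
--         if not frontier:
--             break
--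
--     return ball
-- ===== SOURCE B (Python) =====
-- def bfs_ball(graph, center, radius):
--     """BFS to get ball of given radius."""
--     dist = {center: 0}
--     queue = [center]
--     while queue:
--         node = queue.pop(0)
--         d = dist[node]
--         if d < radius:
--             for nb in graph.get(node, set()):
--                 if nb not in dist:
--                     dist[nb] = d + 1
--                     queue.append(nb)
--     return set(dist)
-- ===== Notes on version B (the rewrite author's own statement) =====
-- stated objective: alternative
-- what changed: Replaces the level-synchronous frontier-set iteration (radius rounds of building a new frontier set, subtracting the ball, unioning) by a classic single-queue BFS that pops one node at a time and keeps a per-node distance map, expanding a node only while its recorded distance is below the radius.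
import Mathlib
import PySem

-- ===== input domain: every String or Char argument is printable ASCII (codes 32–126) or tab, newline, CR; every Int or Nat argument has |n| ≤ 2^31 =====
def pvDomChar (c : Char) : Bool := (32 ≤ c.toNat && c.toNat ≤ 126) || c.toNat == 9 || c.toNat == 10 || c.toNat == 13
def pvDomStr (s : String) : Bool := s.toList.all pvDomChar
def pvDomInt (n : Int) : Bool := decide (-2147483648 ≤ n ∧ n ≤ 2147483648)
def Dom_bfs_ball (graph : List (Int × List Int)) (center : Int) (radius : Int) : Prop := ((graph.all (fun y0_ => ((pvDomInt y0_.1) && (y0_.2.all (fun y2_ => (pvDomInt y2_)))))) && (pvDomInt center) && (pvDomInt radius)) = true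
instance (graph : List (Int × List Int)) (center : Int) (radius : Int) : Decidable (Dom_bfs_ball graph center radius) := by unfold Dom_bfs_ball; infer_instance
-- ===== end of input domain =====

-- B replaces A's level-synchronous frontier-set iteration by a single-queue BFS with a
-- per-node distance map (objective: alternative decomposition, same asymptotic cost).

-- ===== PORT A =====
-- graph.get(node, set()) on the association list (dict: first match wins)
def pvNbrs (graph : List (Int × List Int)) (node : Int) : List Int :=
  (graph.lookup node).getD []

-- the 'for _ in range(radius)' loop with its early break, one level per step
def bfsA_go (graph : List (Int × List Int)) : Nat → PySem.Set Int → PySem.Set Int → PySem.Set Int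
  | 0, ball, _ => ball
  | n+1, ball, frontier =>
    let nf0 : PySem.Set Int :=
      frontier.foldl (fun nf node => PySem.Set.update nf (pvNbrs graph node)) PySem.Set.empty
    let nf := PySem.Set.diff nf0 ball
    let ball' := PySem.Set.update ball nf
    if nf.isEmpty then ball' else bfsA_go graph n ball' nf

def bfs_ball (graph : List (Int × List Int)) (center : Int) (radius : Int) : List Int :=
  bfsA_go graph radius.toNat (PySem.Set.ofList [center]) (PySem.Set.ofList [center])

-- ===== PORT B =====
-- the inner 'for nb in graph.get(node, set())' loop of Source B: state = (queue, dist)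
def pvAddNbrs (d : Int) (st : List Int × PySem.Dict Int Int) (nbs : List Int) :
    List Int × PySem.Dict Int Int :=
  nbs.foldl (fun st nb =>
    if st.2.contains nb then st else (st.1 ++ [nb], st.2.insert nb (d + 1))) st

-- the 'while queue' loop; fuel only makes it total (Python's loop terminates on its own),
-- the equivalence proof shows the initial fuel is never exhausted
def bfsB_go (graph : List (Int × List Int)) (radius : Int) :
    Nat → List Int → PySem.Dict Int Int → PySem.Dict Int Int
  | 0, _, dist => dist
  | _+1, [], dist => dist
  | fuel+1, node :: rest, dist =>
    let d := dist.getD node 0      -- dist[node]; node is always a key of dist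
    if d < radius then
      let st := pvAddNbrs d (rest, dist) (pvNbrs graph node)
      bfsB_go graph radius fuel st.1 st.2
    else
      bfsB_go graph radius fuel rest dist

def bfs_ball_alt (graph : List (Int × List Int)) (center : Int) (radius : Int) : List Int :=
  let dist0 := (PySem.Dict.empty (κ := Int) (ν := Int)).insert center 0
  let fuel := 1 + (graph.map (fun p => p.2.length)).sum
  PySem.Set.ofList (bfsB_go graph radius fuel [center] dist0).keys   -- set(dist)

-- ===== PRECONDITION & SPEC =====
def Spec_bfs_ball (graph : List (Int × List Int)) (center : Int) (radius : Int) (out : List Int) : Prop := out = bfs_ball_alt graph center radius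
instance (graph : List (Int × List Int)) (center : Int) (radius : Int) (out : List Int) : Decidable (Spec_bfs_ball graph center radius out) := by unfold Spec_bfs_ball; infer_instance

-- ===== CLAIM (what is proved, stated in full; the proofs are below) =====
def Claim_equal_bfs_ball : Prop := ∀ (graph : List (Int × List Int)) (center : Int) (radius : Int), Dom_bfs_ball graph center radius → Spec_bfs_ball graph center radius (bfs_ball graph center radius)

-- ===== LEMMAS AND PROOFS =====

def freshList (seen : List Int) : List Int → List Int
  | [] => []
  | nb :: nbs => if nb ∈ seen then freshList seen nbs else nb :: freshList (seen ++ [nb]) nbs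

theorem mem_freshList (y : Int) : ∀ (L seen : List Int), y ∈ freshList seen L ↔ y ∈ L ∧ y ∉ seen := by
  intro L
  induction L with
  | nil => intro seen; simp [freshList]
  | cons nb nbs ih =>
    intro seen
    by_cases h : nb ∈ seen
    · simp only [freshList, if_pos h, ih, List.mem_cons]
      constructor
      · rintro ⟨h1, h2⟩; exact ⟨Or.inr h1, h2⟩
      · rintro ⟨h1 | h1, h2⟩
        · exact absurd (h1 ▸ h) h2
        · exact ⟨h1, h2⟩
    · simp only [freshList, if_neg h, List.mem_cons, ih, List.mem_append]
      by_cases hy : y = nb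
      · subst hy; tauto
      · tauto

theorem nodup_freshList : ∀ (L seen : List Int), (freshList seen L).Nodup := by
  intro L
  induction L with
  | nil => intro seen; simp [freshList]
  | cons nb nbs ih =>
    intro seen
    by_cases h : nb ∈ seen
    · simpa [freshList, if_pos h] using ih seen
    · simp only [freshList, if_neg h, List.nodup_cons]
      refine ⟨?_, ih _⟩
      intro hmem
      have := (mem_freshList nb nbs (seen ++ [nb])).1 hmem
      simp at this

theorem freshList_append : ∀ (xs ys seen : List Int),
    freshList seen (xs ++ ys) = freshList seen xs ++ freshList (seen ++ freshList seen xs) ys := by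
  intro xs
  induction xs with
  | nil => intro ys seen; simp [freshList]
  | cons x xs ih =>
    intro ys seen
    by_cases h : x ∈ seen
    · simp [freshList, if_pos h, ih]
    · simp only [List.cons_append, freshList, if_neg h, ih, List.append_assoc, List.cons_append,
        List.nil_append]

theorem nbrs_sub_flatMap (graph : List (Int × List Int)) (node y : Int)
    (h : y ∈ pvNbrs graph node) : y ∈ graph.flatMap (fun p => p.2) := by
  induction graph with
  | nil => simp [pvNbrs] at h
  | cons p g ih =>
    simp only [pvNbrs, List.lookup] at h
    cases hb : (node == p.1) with
    | true =>
      rw [hb] at h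
      simp only [Option.getD_some] at h
      simp [List.flatMap_cons, h]
    | false =>
      rw [hb] at h
      simp only [List.flatMap_cons, List.mem_append]
      exact Or.inr (ih h)

theorem foldA_eq_ofList (graph : List (Int × List Int)) : ∀ (frontier : List Int) (s : PySem.Set Int),
    frontier.foldl (fun nf node => PySem.Set.update nf (pvNbrs graph node)) s
      = PySem.Set.update s (frontier.flatMap (pvNbrs graph)) := by
  intro frontier
  induction frontier with
  | nil => intro s; simp [PySem.Set.update_nil]
  | cons a l ih =>
    intro s
    simp only [List.foldl_cons, List.flatMap_cons, ih, PySem.Set.update_append]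

theorem diff_ofList_eq_freshList : ∀ (L ball : List Int),
    PySem.Set.diff (PySem.Set.ofList L) ball = freshList ball L := by
  intro L
  induction L using List.reverseRecOn with
  | nil => intro ball; simp [PySem.Set.diff, PySem.Set.ofList, freshList]
  | append_singleton L x ih =>
    intro ball
    rw [PySem.Set.ofList_append_singleton, PySem.Set.add_eq_ite,
      freshList_append L [x] ball]
    by_cases hL : x ∈ PySem.Set.ofList L
    · rw [if_pos hL]
      have hxL : x ∈ L := (PySem.Set.mem_ofList L x).1 hL
      have hcond : x ∈ ball ++ freshList ball L := by
        by_cases hb : x ∈ ball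
        · simp [hb]
        · simp [List.mem_append, (mem_freshList x L ball).2 ⟨hxL, hb⟩]
      simp [freshList, hcond, ih]
    · rw [if_neg hL]
      have hxL : x ∉ L := fun hx => hL ((PySem.Set.mem_ofList L x).2 hx)
      have ih' : List.filter (fun y => !decide (y ∈ ball)) (PySem.Set.ofList L) = freshList ball L := by
        simpa [PySem.Set.diff] using ih ball
      simp only [PySem.Set.diff, List.filter_append]
      by_cases hb : x ∈ ball
      · have hcond : x ∈ ball ++ freshList ball L := by simp [hb]
        simp [freshList, hcond, ih', hb]
      · have hcond : x ∉ ball ++ freshList ball L := by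
          simp only [List.mem_append, not_or]
          exact ⟨hb, fun hf => hxL ((mem_freshList x L ball).1 hf).1⟩
        simp [freshList, hcond, ih', hb]

theorem addNbrs_split (dv : Int) : ∀ (nbs q : List Int) (dd : PySem.Dict Int Int),
    pvAddNbrs dv (q, dd) nbs
      = (q ++ (pvAddNbrs dv ([], dd) nbs).1, (pvAddNbrs dv ([], dd) nbs).2) := by
  intro nbs
  induction nbs with
  | nil => intro q dd; simp [pvAddNbrs]
  | cons nb nbs ih =>
    intro q dd
    simp only [pvAddNbrs, List.foldl_cons]
    by_cases h : dd.contains nb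
    · simp only [h, if_true]
      exact ih q dd
    · simp only [h, if_false, Bool.false_eq_true]
      show pvAddNbrs dv (q ++ [nb], dd.insert nb (dv + 1)) nbs
          = (q ++ (pvAddNbrs dv ([] ++ [nb], dd.insert nb (dv + 1)) nbs).1,
             (pvAddNbrs dv ([] ++ [nb], dd.insert nb (dv + 1)) nbs).2)
      rw [List.nil_append, ih (q ++ [nb]), ih [nb]]
      simp [List.append_assoc]

theorem addNbrs_queue (dv : Int) : ∀ (nbs : List Int) (dd : PySem.Dict Int Int),
    (pvAddNbrs dv ([], dd) nbs).1 = freshList dd.keys nbs := by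
  intro nbs
  induction nbs with
  | nil => intro dd; simp [pvAddNbrs, freshList]
  | cons nb nbs ih =>
    intro dd
    simp only [pvAddNbrs, List.foldl_cons]
    by_cases h : dd.contains nb
    · have hm : nb ∈ dd.keys := (PySem.Dict.contains_iff_mem_keys dd nb).1 h
      simp only [h, if_true, freshList, if_pos hm]
      exact ih dd
    · have hm : nb ∉ dd.keys := fun hk => h ((PySem.Dict.contains_iff_mem_keys dd nb).2 hk)
      have hc : dd.contains nb = false := by rw [← Bool.not_eq_true]; exact h
      simp only [h, if_false, Bool.false_eq_true]
      show (pvAddNbrs dv ([nb], dd.insert nb (dv + 1)) nbs).1 = _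
      rw [addNbrs_split dv nbs [nb], ih]
      simp [freshList, hm, PySem.Dict.keys_insert_of_not_contains dd _ hc]

theorem addNbrs_keys (dv : Int) : ∀ (nbs : List Int) (dd : PySem.Dict Int Int),
    (pvAddNbrs dv ([], dd) nbs).2.keys = dd.keys ++ freshList dd.keys nbs := by
  intro nbs
  induction nbs with
  | nil => intro dd; simp [pvAddNbrs, freshList]
  | cons nb nbs ih =>
    intro dd
    simp only [pvAddNbrs, List.foldl_cons]
    by_cases h : dd.contains nb
    · have hm : nb ∈ dd.keys := (PySem.Dict.contains_iff_mem_keys dd nb).1 h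
      simp only [h, if_true, freshList, if_pos hm]
      exact ih dd
    · have hm : nb ∉ dd.keys := fun hk => h ((PySem.Dict.contains_iff_mem_keys dd nb).2 hk)
      have hc : dd.contains nb = false := by rw [← Bool.not_eq_true]; exact h
      simp only [h, if_false, Bool.false_eq_true]
      show (pvAddNbrs dv ([nb], dd.insert nb (dv + 1)) nbs).2.keys = _
      rw [addNbrs_split dv nbs [nb], ih]
      simp [freshList, hm, PySem.Dict.keys_insert_of_not_contains dd _ hc]

theorem addNbrs_get?_pres (dv : Int) : ∀ (nbs : List Int) (st : List Int × PySem.Dict Int Int)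
    (x : Int) (v : Int), st.2.get? x = some v → (pvAddNbrs dv st nbs).2.get? x = some v := by
  intro nbs
  induction nbs with
  | nil => intro st x v h; simpa [pvAddNbrs] using h
  | cons nb nbs ih =>
    intro st x v h
    simp only [pvAddNbrs, List.foldl_cons]
    by_cases hc : st.2.contains nb
    · simp only [hc, if_true]
      exact ih st x v h
    · simp only [hc, if_false, Bool.false_eq_true]
      refine ih _ x v ?_
      have hne : x ≠ nb := by
        intro he
        subst he
        rw [PySem.Dict.contains_eq_isSome_get?, h] at hc
        simp at hc
      simpa using (PySem.Dict.get?_insert_of_ne st.2 (dv + 1) hne).trans h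

theorem addNbrs_get?_new (dv : Int) : ∀ (nbs : List Int) (dd : PySem.Dict Int Int) (y : Int),
    y ∈ freshList dd.keys nbs → (pvAddNbrs dv ([], dd) nbs).2.get? y = some (dv + 1) := by
  intro nbs
  induction nbs with
  | nil => intro dd y h; simp [freshList] at h
  | cons nb nbs ih =>
    intro dd y h
    simp only [pvAddNbrs, List.foldl_cons]
    by_cases hc : dd.contains nb
    · have hm : nb ∈ dd.keys := (PySem.Dict.contains_iff_mem_keys dd nb).1 hc
      rw [freshList, if_pos hm] at h
      simp only [hc, if_true]
      exact ih dd y h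
    · have hm : nb ∉ dd.keys := fun hk => hc ((PySem.Dict.contains_iff_mem_keys dd nb).2 hk)
      have hcf : dd.contains nb = false := by rw [← Bool.not_eq_true]; exact hc
      rw [freshList, if_neg hm] at h
      simp only [hc, if_false, Bool.false_eq_true]
      show (pvAddNbrs dv ([nb], dd.insert nb (dv + 1)) nbs).2.get? y = some (dv + 1)
      rw [addNbrs_split dv nbs [nb]]
      rcases List.mem_cons.1 h with he | hrest
      · subst he
        exact addNbrs_get?_pres dv nbs _ y (dv + 1)
          (PySem.Dict.get?_insert_self dd y (dv + 1))
      · have := ih (dd.insert nb (dv + 1)) y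
        rw [PySem.Dict.keys_insert_of_not_contains dd _ hcf] at this
        exact this hrest

theorem bfsB_nil (graph : List (Int × List Int)) (radius : Int) (fuel : Nat)
    (dist : PySem.Dict Int Int) : bfsB_go graph radius fuel [] dist = dist := by
  cases fuel <;> rfl

theorem bfsB_drain (graph : List (Int × List Int)) (radius : Int) : ∀ (fuel : Nat)
    (q : List Int) (dist : PySem.Dict Int Int),
    (∀ x ∈ q, ∃ v, dist.get? x = some v ∧ ¬ v < radius) →
    bfsB_go graph radius fuel q dist = dist := by
  intro fuel
  induction fuel with
  | zero => intro q dist _; rfl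
  | succ n ih =>
    intro q dist h
    cases q with
    | nil => rfl
    | cons node rest =>
      obtain ⟨v, hv, hnv⟩ := h node (List.mem_cons_self)
      have hd : dist.getD node 0 = v := by
        rw [PySem.Dict.getD_eq_get?_getD, hv]; rfl
      show (if dist.getD node 0 < radius then _ else bfsB_go graph radius n rest dist) = dist
      rw [hd, if_neg hnv]
      exact ih rest dist (fun x hx => h x (List.mem_cons_of_mem _ hx))

theorem bfsB_level (graph : List (Int × List Int)) (radius dv : Int) (hlt : dv < radius) :
    ∀ (rem disc : List Int) (dist : PySem.Dict Int Int) (fuel : Nat),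
    (∀ x ∈ rem, dist.get? x = some dv) →
    ∃ dist',
      bfsB_go graph radius (rem.length + fuel) (rem ++ disc) dist
        = bfsB_go graph radius fuel
            (disc ++ freshList dist.keys (rem.flatMap (pvNbrs graph))) dist'
      ∧ dist'.keys = dist.keys ++ freshList dist.keys (rem.flatMap (pvNbrs graph))
      ∧ (∀ x v, dist.get? x = some v → dist'.get? x = some v)
      ∧ (∀ y ∈ freshList dist.keys (rem.flatMap (pvNbrs graph)), dist'.get? y = some (dv + 1)) := by
  intro rem
  induction rem with
  | nil =>
    intro disc dist fuel _
    refine ⟨dist, ?_, ?_, ?_, ?_⟩ <;> simp [freshList]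
  | cons node rest ih =>
    intro disc dist fuel hr
    have hd : dist.getD node 0 = dv := by
      rw [PySem.Dict.getD_eq_get?_getD, hr node List.mem_cons_self]; rfl
    -- one step of the loop
    have hstep :
        bfsB_go graph radius ((node :: rest).length + fuel) ((node :: rest) ++ disc) dist
          = bfsB_go graph radius (rest.length + fuel)
              (pvAddNbrs dv (rest ++ disc, dist) (pvNbrs graph node)).1
              (pvAddNbrs dv (rest ++ disc, dist) (pvNbrs graph node)).2 := by
      have hlen : (node :: rest).length + fuel = (rest.length + fuel) + 1 := by
        simp [List.length_cons]; omega
      rw [hlen]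
      show (if dist.getD node 0 < radius then _ else _) = _
      rw [hd, if_pos hlt]
      rfl
    set nbs := pvNbrs graph node with hnbs
    set new₁ := freshList dist.keys nbs with hnew₁
    have hsplit := addNbrs_split dv nbs (rest ++ disc) dist
    have hq1 : (pvAddNbrs dv (rest ++ disc, dist) nbs).1 = rest ++ (disc ++ new₁) := by
      rw [hsplit]; simp [addNbrs_queue dv nbs dist, hnew₁]
    have hd2 : (pvAddNbrs dv (rest ++ disc, dist) nbs).2 = (pvAddNbrs dv ([], dist) nbs).2 := by
      rw [hsplit]
    set dd₁ := (pvAddNbrs dv ([], dist) nbs).2 with hdd₁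
    have hk1 : dd₁.keys = dist.keys ++ new₁ := addNbrs_keys dv nbs dist
    have hpres1 : ∀ x v, dist.get? x = some v → dd₁.get? x = some v :=
      fun x v h => addNbrs_get?_pres dv nbs ([], dist) x v h
    have hnew1 : ∀ y ∈ new₁, dd₁.get? y = some (dv + 1) :=
      fun y hy => addNbrs_get?_new dv nbs dist y hy
    obtain ⟨dist', heq, hkeys, hpres, hnewv⟩ :=
      ih (disc ++ new₁) dd₁ fuel (fun x hx => hpres1 x dv (hr x (List.mem_cons_of_mem _ hx)))
    refine ⟨dist', ?_, ?_, ?_, ?_⟩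
    · rw [hstep, hq1, hd2, heq]
      congr 1
      rw [List.flatMap_cons, freshList_append, ← hnbs, ← hnew₁, ← hk1, List.append_assoc]
    · rw [hkeys, List.flatMap_cons, freshList_append, ← hnbs, ← hnew₁, ← hk1, hk1, List.append_assoc]
    · exact fun x v h => hpres x v (hpres1 x v h)
    · intro y hy
      rw [List.flatMap_cons, freshList_append, ← hnbs, ← hnew₁, ← hk1] at hy
      rcases List.mem_append.1 hy with h1 | h2
      · exact hpres y (dv + 1) (hnew1 y h1)
      · exact hnewv y h2

theorem nodup_subset_length_le (l C : List Int) (h : l.Nodup) (hs : l ⊆ C) :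
    l.length ≤ C.length :=
  calc l.length = l.toFinset.card := (List.toFinset_card_of_nodup h).symm
    _ ≤ C.toFinset.card := Finset.card_le_card
        (fun x hx => List.mem_toFinset.mpr (hs (List.mem_toFinset.mp hx)))
    _ ≤ C.length := List.toFinset_card_le C

theorem bfsB_main (graph : List (Int × List Int)) (radius : Int) (C : List Int)
    (hC : ∀ y ∈ graph.flatMap (fun p => p.2), y ∈ C) :
    ∀ (n : Nat) (frontier : List Int) (dist : PySem.Dict Int Int) (fuel : Nat) (dv : Int),
    dist.keys.Nodup →
    (∀ x ∈ frontier, dist.get? x = some dv) →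
    n = (radius - dv).toNat →
    frontier.length + C.length ≤ fuel + dist.keys.length →
    dist.keys ⊆ C →
    (bfsB_go graph radius fuel frontier dist).keys = bfsA_go graph n dist.keys frontier
      ∧ (bfsB_go graph radius fuel frontier dist).keys.Nodup := by
  intro n
  induction n with
  | zero =>
    intro frontier dist fuel dv h1 h2 hn _h4 _h5
    have hge : ¬ dv < radius := by omega
    rw [bfsB_drain graph radius fuel frontier dist
      (fun x hx => ⟨dv, h2 x hx, hge⟩)]
    exact ⟨rfl, h1⟩
  | succ n ih =>
    intro frontier dist fuel dv h1 h2 hn h4 h5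
    have hlt : dv < radius := by omega
    set L := frontier.flatMap (pvNbrs graph) with hL
    set nf := freshList dist.keys L with hnf
    -- fuel is large enough to pop the whole frontier
    have hklen : dist.keys.length ≤ C.length := nodup_subset_length_le _ _ h1 h5
    obtain ⟨fuel', hfuel⟩ : ∃ fuel', fuel = frontier.length + fuel' :=
      ⟨fuel - frontier.length, by omega⟩
    obtain ⟨dist', heq, hkeys, hpres, hnewv⟩ :=
      bfsB_level graph radius dv hlt frontier [] dist fuel' h2
    rw [List.append_nil] at heq
    rw [List.nil_append] at heq
    rw [← hL, ← hnf] at heq hkeys hnewv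
    -- the A side computes the same new frontier
    have hAnf : PySem.Set.diff
        (frontier.foldl (fun nf node => PySem.Set.update nf (pvNbrs graph node)) PySem.Set.empty)
        dist.keys = nf := by
      rw [foldA_eq_ofList graph frontier PySem.Set.empty]
      have : PySem.Set.update PySem.Set.empty L = PySem.Set.ofList L :=
        PySem.Set.update_nil_left L
      rw [this, diff_ofList_eq_freshList]
    have hnfnodup : nf.Nodup := hnf ▸ nodup_freshList L dist.keys
    have hnfdisj : ∀ x ∈ nf, x ∉ dist.keys :=
      fun x hx => ((mem_freshList x L dist.keys).1 (hnf ▸ hx)).2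
    have hball' : PySem.Set.update dist.keys nf = dist.keys ++ nf :=
      PySem.Set.update_eq_append_of_disjoint dist.keys nf hnfnodup hnfdisj
    have hA : bfsA_go graph (n + 1) dist.keys frontier
        = if nf.isEmpty then dist.keys ++ nf else bfsA_go graph n (dist.keys ++ nf) nf := by
      show (if (PySem.Set.diff _ dist.keys).isEmpty
            then PySem.Set.update dist.keys (PySem.Set.diff _ dist.keys)
            else bfsA_go graph n (PySem.Set.update dist.keys (PySem.Set.diff _ dist.keys))
              (PySem.Set.diff _ dist.keys)) = _
      rw [hAnf, hball']
    rw [hfuel, heq]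
    by_cases hempty : nf = []
    · rw [hA, hempty]
      simp only [List.isEmpty_nil, if_true, List.append_nil]
      rw [hempty] at hkeys
      rw [List.append_nil] at hkeys
      rw [bfsB_nil]
      exact ⟨hkeys, hkeys ▸ h1⟩
    · rw [hA, if_neg (by simpa [List.isEmpty_iff] using hempty)]
      have h1' : dist'.keys.Nodup := by
        rw [hkeys, List.nodup_append]
        exact ⟨h1, hnfnodup, by intro a ha b hb he; exact hnfdisj a (he ▸ hb) ha⟩
      have h2' : ∀ x ∈ nf, dist'.get? x = some (dv + 1) := fun x hx => hnewv x hx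
      have hn' : n = (radius - (dv + 1)).toNat := by omega
      have h4' : nf.length + C.length ≤ fuel' + dist'.keys.length := by
        rw [hkeys, List.length_append]
        omega
      have h5' : dist'.keys ⊆ C := by
        rw [hkeys]
        intro y hy
        rcases List.mem_append.1 hy with h | h
        · exact h5 h
        · have hyL : y ∈ L := ((mem_freshList y L dist.keys).1 (hnf ▸ h)).1
          obtain ⟨node, _, hynb⟩ := List.mem_flatMap.1 (hL ▸ hyL)
          exact hC y (nbrs_sub_flatMap graph node y hynb)
      obtain ⟨e1, e2⟩ := ih nf dist' fuel' (dv + 1) h1' h2' hn' h4' h5'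
      rw [hkeys] at e1
      exact ⟨e1, e2⟩

theorem bfs_ball_eq_alt (graph : List (Int × List Int)) (center : Int) (radius : Int) :
    bfs_ball graph center radius = bfs_ball_alt graph center radius := by
  have hk0 : ((PySem.Dict.empty (κ := Int) (ν := Int)).insert center 0).keys = [center] := rfl
  have hg0 : ((PySem.Dict.empty (κ := Int) (ν := Int)).insert center 0).get? center = some 0 :=
    PySem.Dict.get?_insert_self _ _ _
  have hflat : (graph.flatMap (fun p => p.2)).length = (graph.map (fun p => p.2.length)).sum := by
    rw [List.length_flatMap]
  obtain ⟨e1, e2⟩ := bfsB_main graph radius (center :: graph.flatMap (fun p => p.2))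
    (fun y hy => List.mem_cons_of_mem _ hy)
    radius.toNat [center] ((PySem.Dict.empty (κ := Int) (ν := Int)).insert center 0)
    (1 + (graph.map (fun p => p.2.length)).sum) 0
    (by rw [hk0]; simp)
    (by intro x hx; rw [List.mem_singleton] at hx; rw [hx]; exact hg0)
    (by omega)
    (by rw [hk0]; simp only [List.length_cons, hflat]; omega)
    (by rw [hk0]; intro x hx; rw [List.mem_singleton] at hx; rw [hx]; exact List.mem_cons_self)
  rw [hk0] at e1
  show bfsA_go graph radius.toNat (PySem.Set.ofList [center]) (PySem.Set.ofList [center])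
      = PySem.Set.ofList (bfsB_go graph radius (1 + (graph.map (fun p => p.2.length)).sum)
          [center] ((PySem.Dict.empty (κ := Int) (ν := Int)).insert center 0)).keys
  rw [PySem.Set.ofList_eq_self_of_nodup _ e2, e1]
  rfl

-- ===== VERDICT (by name: the statement is the Claim_ definition above) =====
theorem bfs_ball_spec : Claim_equal_bfs_ball := by
  intro graph center radius _
  unfold Spec_bfs_ball
  exact bfs_ball_eq_alt graph center radius
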